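-- pv_equiv track=rewrite | github.com/iamnshrd/mentions | agents/mentions/providers/kalshi/sourcing.py | _matches_topic
-- ===== SOURCE A (Python) =====
-- TOPIC_ALIASES = {
--     'iran': ['iran', 'iranian'],
--     'israel': ['israel', 'israeli'],
--     'ukraine': ['ukraine', 'ukrainian'],
--     'china': ['china', 'chinese'],
--     'oil': ['oil', 'crude'],
--     'bitcoin': ['bitcoin', 'btc'],
--     'crypto': ['crypto', 'cryptocurrency', 'btc', 'eth'],
-- }
--
-- def _matches_topic(market: dict, topics: list[str]) -> bool:
--     title = (market.get('title', '') or '').lower()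
--     ticker = (market.get('ticker', '') or '').lower()
--     subtitle = (market.get('subtitle', '') or '').lower()
--     yes_sub = (market.get('yes_sub_title', '') or '').lower()
--     no_sub = (market.get('no_sub_title', '') or '').lower()
--     combined = ' '.join([title, ticker, subtitle, yes_sub, no_sub])
--     label_tokens = _normalized_label_tokens(market)
--
--     for topic in topics:
--         aliases = TOPIC_ALIASES.get(topic, [topic])
--         if any(alias in combined for alias in aliases):
--             return True
--         if any(alias in label_tokens for alias in aliases):
--             return True
--     return False
--
-- def _normalized_label_tokens(market: dict) -> set[str]:
--     raw = ' '.join([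
--         market.get('ticker', '') or '',
--         market.get('subtitle', '') or '',
--         market.get('yes_sub_title', '') or '',
--         market.get('no_sub_title', '') or '',
--     ]).lower()
--
--     cleaned = []
--     token = []
--     for ch in raw:
--         if ch.isalnum():
--             token.append(ch)
--         else:
--             if token:
--                 cleaned.append(''.join(token))
--                 token = []
--     if token:
--         cleaned.append(''.join(token))
--     return set(cleaned)
-- ===== SOURCE B (Python) =====
-- TOPIC_ALIASES = {
--     'iran': ['iran', 'iranian'],
--     'israel': ['israel', 'israeli'],
--     'ukraine': ['ukraine', 'ukrainian'],
--     'china': ['china', 'chinese'],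
--     'oil': ['oil', 'crude'],
--     'bitcoin': ['bitcoin', 'btc'],
--     'crypto': ['crypto', 'cryptocurrency', 'btc', 'eth'],
-- }
--
-- _FIELDS = ('title', 'ticker', 'subtitle', 'yes_sub_title', 'no_sub_title')
--
-- def _matches_topic(market: dict, topics: list) -> bool:
--     combined = ' '.join((market.get(k, '') or '').lower() for k in _FIELDS)
--     return any(alias in combined
--                for topic in topics
--                for alias in TOPIC_ALIASES.get(topic, [topic]))
-- ===== Notes on version B (the rewrite author's own statement) =====
-- stated objective: simpler
-- what changed: B drops _normalized_label_tokens and its token-set branch entirely (every token of that set is by construction a substring of combined, so the branch can never add a match) and reduces the function to one any() over the aliases' substring test against combined.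
import Mathlib
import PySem

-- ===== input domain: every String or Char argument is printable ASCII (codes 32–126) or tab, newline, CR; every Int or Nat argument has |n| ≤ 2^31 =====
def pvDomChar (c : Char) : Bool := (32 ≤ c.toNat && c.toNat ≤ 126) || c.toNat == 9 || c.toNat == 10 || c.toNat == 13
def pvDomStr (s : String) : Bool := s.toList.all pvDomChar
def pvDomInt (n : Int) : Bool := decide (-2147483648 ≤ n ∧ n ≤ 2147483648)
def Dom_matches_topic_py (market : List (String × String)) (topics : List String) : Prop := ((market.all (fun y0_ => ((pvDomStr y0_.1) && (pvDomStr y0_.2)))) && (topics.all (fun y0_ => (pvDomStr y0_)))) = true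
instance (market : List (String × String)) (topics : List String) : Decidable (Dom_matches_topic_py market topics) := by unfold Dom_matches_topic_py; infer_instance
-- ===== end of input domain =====

-- B drops A's `_normalized_label_tokens` set entirely (every token of it is already a
-- substring of `combined`, so that branch can never fire) and collapses the loop to a
-- single `any` over the aliases' substring test: objective = simpler.

-- TOPIC_ALIASES module constant (identical literal in both Python files)
def topicAliases : PySem.Dict String (List String) := PySem.Dict.ofList
  [("iran", ["iran", "iranian"]),
   ("israel", ["israel", "israeli"]),
   ("ukraine", ["ukraine", "ukrainian"]),
   ("china", ["china", "chinese"]),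
   ("oil", ["oil", "crude"]),
   ("bitcoin", ["bitcoin", "btc"]),
   ("crypto", ["crypto", "cryptocurrency", "btc", "eth"])]

-- ===== PORT A =====
-- `market.get(k, '') or ''`: the values are strings, so `or ''` is the identity; ported as getD.
-- the character loop of _normalized_label_tokens (cleaned/token accumulators, final flush)
def tokLoop : List Char → List String → List Char → List String
  | [], cleaned, token => if token.isEmpty then cleaned else cleaned ++ [String.ofList token]
  | ch :: rest, cleaned, token =>
      if PySem.Chars.isalnum ch then tokLoop rest cleaned (token ++ [ch])
      else if token.isEmpty then tokLoop rest cleaned []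
      else tokLoop rest (cleaned ++ [String.ofList token]) []

def normalizedLabelTokens (market : List (String × String)) : PySem.Set String :=
  let raw := PySem.Str.lower (PySem.Str.join " "
    [PySem.Dict.getD (PySem.Dict.mk market) "ticker" "",
     PySem.Dict.getD (PySem.Dict.mk market) "subtitle" "",
     PySem.Dict.getD (PySem.Dict.mk market) "yes_sub_title" "",
     PySem.Dict.getD (PySem.Dict.mk market) "no_sub_title" ""])
  PySem.Set.ofList (tokLoop raw.toList [] [])

-- the `for topic in topics` loop with its two early returns
def matchLoop (combined : String) (labelTokens : PySem.Set String) : List String → Bool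
  | [] => false
  | topic :: rest =>
      let aliases := PySem.Dict.getD topicAliases topic [topic]
      if aliases.any (fun al => PySem.Str.isIn al combined) then true
      else if aliases.any (fun al => PySem.Set.contains labelTokens al) then true
      else matchLoop combined labelTokens rest

def matches_topic_py (market : List (String × String)) (topics : List String) : Bool :=
  let title := PySem.Str.lower (PySem.Dict.getD (PySem.Dict.mk market) "title" "")
  let ticker := PySem.Str.lower (PySem.Dict.getD (PySem.Dict.mk market) "ticker" "")
  let subtitle := PySem.Str.lower (PySem.Dict.getD (PySem.Dict.mk market) "subtitle" "")
  let yes_sub := PySem.Str.lower (PySem.Dict.getD (PySem.Dict.mk market) "yes_sub_title" "")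
  let no_sub := PySem.Str.lower (PySem.Dict.getD (PySem.Dict.mk market) "no_sub_title" "")
  let combined := PySem.Str.join " " [title, ticker, subtitle, yes_sub, no_sub]
  let labelTokens := normalizedLabelTokens market
  matchLoop combined labelTokens topics

-- ===== PORT B =====
def fieldKeys : List String := ["title", "ticker", "subtitle", "yes_sub_title", "no_sub_title"]

def matches_topic_py_alt (market : List (String × String)) (topics : List String) : Bool :=
  let combined := PySem.Str.join " "
    (fieldKeys.map (fun k => PySem.Str.lower (PySem.Dict.getD (PySem.Dict.mk market) k "")))
  topics.any (fun topic =>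
    (PySem.Dict.getD topicAliases topic [topic]).any
      (fun al => PySem.Str.isIn al combined))

-- ===== PRECONDITION & SPEC =====
def Spec_matches_topic_py (market : List (String × String)) (topics : List String) (out : Bool) : Prop := out = matches_topic_py_alt market topics
instance (market : List (String × String)) (topics : List String) (out : Bool) : Decidable (Spec_matches_topic_py market topics out) := by unfold Spec_matches_topic_py; infer_instance

-- ===== CLAIM (what is proved, stated in full; the proofs are below) =====
def Claim_equal_matches_topic_py : Prop := ∀ (market : List (String × String)) (topics : List String), Dom_matches_topic_py market topics → Spec_matches_topic_py market topics (matches_topic_py market topics)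

-- ===== LEMMAS AND PROOFS =====

-- every string the tokenizer emits is either already in `cleaned` or an infix of what remains to scan
theorem tokLoop_mem (l : List Char) : ∀ (cleaned : List String) (token : List Char)
    (s : String), s ∈ tokLoop l cleaned token → s ∈ cleaned ∨ s.toList <:+: token ++ l := by
  induction l with
  | nil =>
      intro cleaned token s h
      simp only [tokLoop] at h
      split at h
      · exact Or.inl h
      · rcases List.mem_append.1 h with h | h
        · exact Or.inl h
        · simp only [List.mem_singleton] at h
          subst h
          exact Or.inr (by simp [String.toList_ofList])
  | cons ch rest ih =>
      intro cleaned token s h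
      simp only [tokLoop] at h
      split at h
      · rcases ih cleaned (token ++ [ch]) s h with h' | h'
        · exact Or.inl h'
        · exact Or.inr (by simpa using h')
      · split at h
        · rcases ih cleaned [] s h with h' | h'
          · exact Or.inl h'
          · exact Or.inr ((by simpa using h' : s.toList <:+: rest).trans
              (by exact ⟨token ++ [ch], [], by simp⟩))
        · rcases ih (cleaned ++ [String.ofList token]) [] s h with h' | h'
          · rcases List.mem_append.1 h' with h'' | h''
            · exact Or.inl h''
            · simp only [List.mem_singleton] at h''
              subst h''
              exact Or.inr ⟨[], ch :: rest, by simp [String.toList_ofList]⟩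
          · exact Or.inr ((by simpa using h' : s.toList <:+: rest).trans
              (by exact ⟨token ++ [ch], [], by simp⟩))

-- `raw` (the lower-cased label text) is an infix of `combined`
theorem raw_infix_combined (market : List (String × String)) :
    (PySem.Str.lower (PySem.Str.join " "
      [PySem.Dict.getD (PySem.Dict.mk market) "ticker" "",
       PySem.Dict.getD (PySem.Dict.mk market) "subtitle" "",
       PySem.Dict.getD (PySem.Dict.mk market) "yes_sub_title" "",
       PySem.Dict.getD (PySem.Dict.mk market) "no_sub_title" ""])).toList <:+:
    (PySem.Str.join " "
      [PySem.Str.lower (PySem.Dict.getD (PySem.Dict.mk market) "title" ""),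
       PySem.Str.lower (PySem.Dict.getD (PySem.Dict.mk market) "ticker" ""),
       PySem.Str.lower (PySem.Dict.getD (PySem.Dict.mk market) "subtitle" ""),
       PySem.Str.lower (PySem.Dict.getD (PySem.Dict.mk market) "yes_sub_title" ""),
       PySem.Str.lower (PySem.Dict.getD (PySem.Dict.mk market) "no_sub_title" "")]).toList := by
  simp only [PySem.Str.toList_join, PySem.Str.toList_lower, List.map]
  simp only [PySem.Chars.join_cons_cons, PySem.Chars.join_singleton, PySem.Chars.lower,
    List.map_append]
  refine ⟨(PySem.Chars.lower (PySem.Dict.getD (PySem.Dict.mk market) "title" "").toList)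
      ++ List.map PySem.Chars.lowerChar " ".toList, [], ?_⟩
  have hsp : PySem.Chars.lowerChar ' ' = ' ' := by decide
  simp [PySem.Chars.lower, List.append_assoc, hsp]

-- an al in the token set is always a substring of combined, so A's second branch is redundant
theorem token_isIn_combined (market : List (String × String)) (al : String)
    (h : PySem.Set.contains (normalizedLabelTokens market) al = true) :
    PySem.Str.isIn al (PySem.Str.join " "
      [PySem.Str.lower (PySem.Dict.getD (PySem.Dict.mk market) "title" ""),
       PySem.Str.lower (PySem.Dict.getD (PySem.Dict.mk market) "ticker" ""),
       PySem.Str.lower (PySem.Dict.getD (PySem.Dict.mk market) "subtitle" ""),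
       PySem.Str.lower (PySem.Dict.getD (PySem.Dict.mk market) "yes_sub_title" ""),
       PySem.Str.lower (PySem.Dict.getD (PySem.Dict.mk market) "no_sub_title" "")]) = true := by
  rw [PySem.Set.contains_iff] at h
  rw [normalizedLabelTokens, PySem.Set.mem_ofList] at h
  rcases tokLoop_mem _ [] [] al h with h' | h'
  · simp at h'
  · rw [PySem.Str.isIn_iff_infix]
    refine List.IsInfix.trans ?_ (raw_infix_combined market)
    simpa using h'

theorem matchLoop_eq_any (combined : String) (tokens : PySem.Set String)
    (hsub : ∀ al, PySem.Set.contains tokens al = true → PySem.Str.isIn al combined = true) :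
    ∀ topics : List String, matchLoop combined tokens topics =
      topics.any (fun topic =>
        (PySem.Dict.getD topicAliases topic [topic]).any
          (fun al => PySem.Str.isIn al combined)) := by
  intro topics
  induction topics with
  | nil => rfl
  | cons topic rest ih =>
      simp only [matchLoop, List.any_cons]
      by_cases h1 : (PySem.Dict.getD topicAliases topic [topic]).any
          (fun al => PySem.Str.isIn al combined) = true
      · rw [if_pos h1, h1, Bool.true_or]
      · have h1' : (PySem.Dict.getD topicAliases topic [topic]).any
            (fun al => PySem.Str.isIn al combined) = false := by
          exact Bool.not_eq_true _ ▸ eq_false_of_ne_true h1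
        rw [if_neg h1]
        have h2 : (PySem.Dict.getD topicAliases topic [topic]).any
            (fun al => PySem.Set.contains tokens al) = false := by
          rw [List.any_eq_false]
          intro al hmem htok
          exact h1 (List.any_eq_true.2 ⟨al, hmem, hsub al htok⟩)
        rw [if_neg (by rw [h2]; exact Bool.false_ne_true), ih, h1', Bool.false_or]

-- ===== VERDICT (by name: the statement is the Claim_ definition above) =====
theorem matches_topic_py_spec : Claim_equal_matches_topic_py := by
  intro market topics _
  unfold Spec_matches_topic_py matches_topic_py matches_topic_py_alt fieldKeys
  simp only [List.map]
  exact matchLoop_eq_any _ _ (token_isIn_combined market) topics
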